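-- pv_equiv track=rewrite | github.com/cwb14/synLTR | module2/ltrharvest_phasing2.py | ltr_kmer_hits
-- ===== SOURCE A (Python) =====
-- def ltr_kmer_hits(seq, k, kmer_sets_by_sg):
--     seq = seq.upper()
--     total = max(0, len(seq) - k + 1)
--     hits = [0] * len(kmer_sets_by_sg)
--     if total == 0:
--         return hits, 0
--     for i in range(total):
--         kmer = seq[i:i + k]
--         for sg, sset in enumerate(kmer_sets_by_sg):
--             if kmer in sset:
--                 hits[sg] += 1
--     return hits, total
-- ===== SOURCE B (Python) =====
-- def ltr_kmer_hits(seq, k, kmer_sets_by_sg):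
--     seq = seq.upper()
--     total = max(0, len(seq) - k + 1)
--     counts = {}
--     for i in range(total):
--         km = seq[i:i + k]
--         counts[km] = counts.get(km, 0) + 1
--     hits = [sum(counts.get(km, 0) for km in dict.fromkeys(sset))
--             for sset in kmer_sets_by_sg]
--     return hits, total
-- ===== Notes on version B (the rewrite author's own statement) =====
-- stated objective: alternative
-- what changed: B makes one pass over the sequence building a kmer->multiplicity counter dict, then computes each superfamily's hit count as the sum of counter values over its distinct kmers, instead of scanning every superfamily's kmer list for every window.
import Mathlib
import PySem

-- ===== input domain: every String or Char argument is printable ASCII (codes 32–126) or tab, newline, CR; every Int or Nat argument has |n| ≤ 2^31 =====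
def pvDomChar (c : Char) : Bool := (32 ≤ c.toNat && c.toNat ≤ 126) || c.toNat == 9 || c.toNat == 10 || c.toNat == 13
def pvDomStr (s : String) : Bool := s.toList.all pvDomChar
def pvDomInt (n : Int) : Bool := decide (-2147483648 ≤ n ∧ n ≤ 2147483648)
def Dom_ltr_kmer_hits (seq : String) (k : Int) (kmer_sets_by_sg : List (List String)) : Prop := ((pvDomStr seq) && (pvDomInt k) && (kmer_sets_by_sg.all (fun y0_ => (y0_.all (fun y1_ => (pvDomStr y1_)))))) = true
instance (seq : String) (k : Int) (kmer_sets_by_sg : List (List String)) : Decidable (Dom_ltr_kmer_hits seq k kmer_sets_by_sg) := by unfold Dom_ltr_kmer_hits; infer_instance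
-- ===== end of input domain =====

-- B replaces the per-window scan of every superfamily list by one counting pass over the
-- windows plus one summation pass per superfamily (objective: alternative).

-- ===== PORT A =====
def ltr_kmer_hits (seq : String) (k : Int) (kmer_sets_by_sg : List (List String)) : List Int × Int :=
  let sequ := PySem.Str.upper seq
  let total := max 0 (PySem.Str.len sequ - k + 1)
  let hits : List Int := List.replicate kmer_sets_by_sg.length 0
  if total = 0 then (hits, 0)
  else
    let hits := (PySem.List.pyRange 0 total 1).foldl (fun hits i =>
      let kmer := PySem.Str.slice sequ (some i) (some (i + k))
      (PySem.List.enumerate kmer_sets_by_sg 0).foldl (fun hits p =>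
        if kmer ∈ p.2 then
          PySem.List.pySetD hits p.1 (PySem.List.pyGetD hits p.1 0 + 1)
        else hits) hits) hits
    (hits, total)

-- ===== PORT B =====
def ltr_kmer_hits_alt (seq : String) (k : Int) (kmer_sets_by_sg : List (List String)) : List Int × Int :=
  let sequ := PySem.Str.upper seq
  let total := max 0 (PySem.Str.len sequ - k + 1)
  let counts := (PySem.List.pyRange 0 total 1).foldl (fun d i =>
      d.modify (PySem.Str.slice sequ (some i) (some (i + k))) 0 (· + 1)) PySem.Dict.empty
  let hits := kmer_sets_by_sg.map (fun sset =>
      (PySem.List.dedup sset).foldl (fun acc km => acc + counts.getD km 0) 0)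
  (hits, total)

-- ===== PRECONDITION & SPEC =====
def Spec_ltr_kmer_hits (seq : String) (k : Int) (kmer_sets_by_sg : List (List String)) (out : List Int × Int) : Prop := out = ltr_kmer_hits_alt seq k kmer_sets_by_sg
instance (seq : String) (k : Int) (kmer_sets_by_sg : List (List String)) (out : List Int × Int) : Decidable (Spec_ltr_kmer_hits seq k kmer_sets_by_sg out) := by unfold Spec_ltr_kmer_hits; infer_instance

-- ===== CLAIM (what is proved, stated in full; the proofs are below) =====
def Claim_equal_ltr_kmer_hits : Prop := ∀ (seq : String) (k : Int) (kmer_sets_by_sg : List (List String)), Dom_ltr_kmer_hits seq k kmer_sets_by_sg → Spec_ltr_kmer_hits seq k kmer_sets_by_sg (ltr_kmer_hits seq k kmer_sets_by_sg)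

-- ===== LEMMAS AND PROOFS =====


lemma pv_zipWith_id (hits : List Int) (sets : List (List String))
    (h : hits.length = sets.length) :
    List.zipWith (fun (x : Int) (_ : List String) => x) hits sets = hits := by
  induction hits generalizing sets with
  | nil => simp
  | cons a t ih =>
    cases sets with
    | nil => simp at h
    | cons s ss => simp at h; simp [ih ss h]

lemma pv_zipWith_zipWith (f g : Int → List String → Int) (hits : List Int)
    (sets : List (List String)) :
    List.zipWith g (List.zipWith f hits sets) sets
      = List.zipWith (fun h s => g (f h s) s) hits sets := by
  induction hits generalizing sets with
  | nil => simp
  | cons a t ih => cases sets with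
    | nil => simp
    | cons s ss => simp [ih ss]

lemma pv_zipWith_replicate (f : Int → List String → Int) (a : Int)
    (sets : List (List String)) :
    List.zipWith f (List.replicate sets.length a) sets = sets.map (f a) := by
  induction sets with
  | nil => simp
  | cons s ss ih => simpa [List.replicate_succ] using ih

-- the inner enumerate-loop of A, on a split hits list, is a zipWith over the suffix
lemma pv_inner (kmer : String) (sets : List (List String)) :
    ∀ (pre hits : List Int), hits.length = sets.length →
    (PySem.List.enumerate sets ((pre.length : Nat) : Int)).foldl
      (fun hits p =>
        if kmer ∈ p.2 then
          PySem.List.pySetD hits p.1 (PySem.List.pyGetD hits p.1 0 + 1)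
        else hits) (pre ++ hits)
    = pre ++ List.zipWith (fun h sset => if kmer ∈ sset then h + 1 else h) hits sets := by
  induction sets with
  | nil => intro pre hits h; simp at h; simp [h, PySem.List.enumerate]
  | cons sset rest ih =>
    intro pre hits hlen
    cases hits with
    | nil => simp at hlen
    | cons h t =>
      simp only [List.length_cons] at hlen
      rw [PySem.List.enumerate_cons, List.foldl_cons]
      have hget : PySem.List.pyGetD (pre ++ h :: t) ((pre.length : Nat) : Int) 0 = h := by
        rw [PySem.List.pyGetD_natCast, List.getD_eq_getElem?_getD,
            List.getElem?_append_right (le_refl pre.length)]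
        simp
      have hset : ∀ v : Int, PySem.List.pySetD (pre ++ h :: t) ((pre.length : Nat) : Int) v
          = (pre ++ [v]) ++ t := by
        intro v
        rw [PySem.List.pySetD_natCast, List.set_append_right _ _ (le_refl pre.length)]
        simp
      by_cases hm : kmer ∈ sset
      · rw [if_pos hm, hget, hset]
        have hstep : ((pre.length : Nat) : Int) + 1 = (((pre ++ [h + 1]).length : Nat) : Int) := by simp
        rw [hstep, ih (pre ++ [h + 1]) t (by omega)]
        simp [hm]
      · rw [if_neg hm]
        have hsplit : pre ++ h :: t = (pre ++ [h]) ++ t := by simp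
        have hstep : ((pre.length : Nat) : Int) + 1 = (((pre ++ [h]).length : Nat) : Int) := by simp
        rw [hsplit, hstep, ih (pre ++ [h]) t (by omega)]
        simp [hm]

-- the whole double loop of A adds, to each slot, the number of windows whose kmer is in that set
lemma pv_outerA (kms : Int → String) (sets : List (List String)) :
    ∀ (L : List Int) (hits : List Int), hits.length = sets.length →
    L.foldl (fun hits i =>
        (PySem.List.enumerate sets 0).foldl (fun hits p =>
          if kms i ∈ p.2 then
            PySem.List.pySetD hits p.1 (PySem.List.pyGetD hits p.1 0 + 1)
          else hits) hits) hits
    = List.zipWith (fun h sset =>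
        h + (((L.map kms).filter (fun x => decide (x ∈ sset))).length : Int)) hits sets := by
  intro L
  induction L with
  | nil =>
    intro hits hlen
    simpa using (pv_zipWith_id hits sets hlen).symm
  | cons i L ih =>
    intro hits hlen
    rw [List.foldl_cons]
    have hin := pv_inner (kms i) sets [] hits hlen
    simp only [List.nil_append, List.length_nil, Nat.cast_zero] at hin
    rw [hin]
    rw [ih _ (by simp [List.length_zipWith, hlen])]
    rw [pv_zipWith_zipWith]
    have hfun : (fun (h : Int) (sset : List String) =>
          (if kms i ∈ sset then h + 1 else h)
            + (((L.map kms).filter (fun x => decide (x ∈ sset))).length : Int))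
        = (fun (h : Int) (sset : List String) =>
          h + ((((i :: L).map kms).filter (fun x => decide (x ∈ sset))).length : Int)) := by
      funext h sset
      simp only [List.map_cons, List.filter_cons]
      by_cases hm : kms i ∈ sset
      · simp only [hm, decide_true, if_pos, List.length_cons]
        push_cast
        ring
      · simp [hm]
    rw [hfun]

-- sum of multiplicities over a duplicate-free key list counts the members
lemma pv_count_sum (D : List String) (hD : D.Nodup) :
    ∀ (L : List String),
    (D.map (fun km => ((L.count km : Nat) : Int))).sum
      = (((L.filter (fun x => decide (x ∈ D))).length : Nat) : Int) := by
  intro L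
  induction L with
  | nil => simp
  | cons x L ih =>
    simp only [List.count_cons, List.filter_cons]
    by_cases hx : x ∈ D
    · have hone : (D.map (fun km => (if (x == km) then (1:Int) else 0))).sum = 1 := by
        rw [PySem.List.sum_map_ite_one_zero]
        have hcp : D.countP (fun km => x == km) = D.count x := by
          rw [List.count]
          apply List.countP_congr
          intro a _
          by_cases h : x = a
          · simp [h]
          · simp only [beq_iff_eq, h]
            simp
            exact fun hh => h hh.symm
        rw [hcp, List.count_eq_one_of_mem hD hx]
        simp
      have hmapeq : D.map (fun km => ((L.count km + if (x == km) then 1 else 0 : Nat) : Int))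
          = D.map (fun km => ((L.count km : Nat) : Int) + (if (x == km) then (1:Int) else 0)) := by
        apply List.map_congr_left
        intro km _
        split <;> simp
      rw [hmapeq, PySem.List.sum_map_add_int, ih, hone]
      simp [hx]
    · have hzero : ∀ km ∈ D, (x == km) = false := by
        intro km hkm
        by_contra hc
        simp at hc
        exact hx (hc ▸ hkm)
      have : (D.map (fun km => ((L.count km + if (x == km) then 1 else 0 : Nat) : Int))).sum
          = (D.map (fun km => ((L.count km : Nat) : Int))).sum := by
        apply congrArg
        apply List.map_congr_left
        intro km hkm
        simp [hzero km hkm]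
      rw [this, ih]
      simp [hx]

-- ===== VERDICT (by name: the statement is the Claim_ definition above) =====
theorem ltr_kmer_hits_spec : Claim_equal_ltr_kmer_hits := by
  intro seq k sets _
  unfold Spec_ltr_kmer_hits ltr_kmer_hits ltr_kmer_hits_alt
  simp only []
  set sequ := PySem.Str.upper seq with hsequ
  set total := max 0 (PySem.Str.len sequ - k + 1) with htotal
  set kms : Int → String := fun i => PySem.Str.slice sequ (some i) (some (i + k)) with hkms
  set W := PySem.List.pyRange 0 total 1 with hW
  have hcounts : ∀ km : String,
      (W.foldl (fun d i => d.modify (kms i) 0 (· + 1)) PySem.Dict.empty).getD km 0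
        = (((W.map kms).count km : Nat) : Int) := by
    intro km
    rw [← List.foldl_map (f := kms) (g := fun d x => PySem.Dict.modify d x 0 (· + 1)),
        PySem.Dict.getD_foldl_modify_add_one]
    simp
  have hB : sets.map (fun sset =>
        (PySem.List.dedup sset).foldl (fun acc km =>
          acc + (W.foldl (fun d i => d.modify (kms i) 0 (· + 1)) PySem.Dict.empty).getD km 0) 0)
      = sets.map (fun sset =>
          (((W.map kms).filter (fun x => decide (x ∈ sset))).length : Int)) := by
    apply List.map_congr_left
    intro sset _
    rw [PySem.List.foldl_add]
    have : (PySem.List.dedup sset).map (fun km =>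
        (W.foldl (fun d i => d.modify (kms i) 0 (· + 1)) PySem.Dict.empty).getD km 0)
      = (PySem.List.dedup sset).map (fun km => (((W.map kms).count km : Nat) : Int)) := by
      apply List.map_congr_left
      intro km _
      exact hcounts km
    rw [this, pv_count_sum _ (PySem.List.nodup_dedup sset) (W.map kms)]
    have hfil : (W.map kms).filter (fun x => decide (x ∈ PySem.List.dedup sset))
        = (W.map kms).filter (fun x => decide (x ∈ sset)) := by
      apply List.filter_congr
      intro x _
      simp
    rw [hfil]
    simp
  by_cases h0 : total = 0
  · rw [if_pos h0, h0]
    have hWnil : W = [] := by rw [hW, h0]; rfl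
    rw [hB, hWnil]
    simp
  · rw [if_neg h0, hB]
    have hA := pv_outerA kms sets W (List.replicate sets.length 0) (by simp)
    rw [hA, pv_zipWith_replicate]
    simp
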